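-- pv_equiv track=rewrite | github.com/kadisak/DiophantineEq95xpyz4 | DioEq95xpyz4_SearchSol(Paper).py | integer_fourth_root
-- ===== SOURCE A (Python) =====
-- def integer_fourth_root(x):
--     if x < 0: raise ValueError("x must be non-negative")
--     if x == 0 or x == 1: return x
--     low, high = 0, x
--     while low <= high:
--         mid = (low + high) // 2
--         mid_pow4 = mid**4
--         if mid_pow4 == x: return mid
--         elif mid_pow4 < x: low = mid + 1
--         else: high = mid - 1
--     return high  # `high` will be the integer part of 4th root of x
-- ===== SOURCE B (Python) =====
-- def integer_fourth_root(x):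
--     # Digit-by-digit (bitwise) fourth root: set bits of the root from the top down.
--     if x < 0: raise ValueError("x must be non-negative")
--     r = 0
--     for k in reversed(range((x.bit_length() + 3) // 4)):
--         c = r + (1 << k)
--         if c**4 <= x:
--             r = c
--     return r
-- ===== Notes on version B (the rewrite author's own statement) =====
-- stated objective: alternative
-- what changed: Replaced the binary search over the whole interval up to x with a digit-by-digit (bitwise) fourth root that sets one bit of the root per step, keeping only the root built so far as state.
import Mathlib
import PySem

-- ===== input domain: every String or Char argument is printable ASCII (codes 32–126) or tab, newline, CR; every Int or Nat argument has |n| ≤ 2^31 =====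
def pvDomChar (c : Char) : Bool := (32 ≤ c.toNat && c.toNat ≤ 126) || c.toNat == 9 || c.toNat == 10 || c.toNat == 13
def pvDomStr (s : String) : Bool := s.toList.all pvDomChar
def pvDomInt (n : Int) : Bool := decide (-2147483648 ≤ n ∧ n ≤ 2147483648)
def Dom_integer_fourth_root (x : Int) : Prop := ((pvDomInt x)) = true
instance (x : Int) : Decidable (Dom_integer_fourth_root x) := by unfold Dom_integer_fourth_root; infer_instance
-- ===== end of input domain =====

-- B replaces A's binary search with a digit-by-digit (bitwise) fourth root (alternative
-- algorithm); equal wherever the Python returns (Pre_ excludes the negative inputs,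
-- where both Pythons raise ValueError).

-- ===== PORT A =====
-- binary-search loop of A; returns `high` when low > high
def ifrLoop (x low high : Int) : Int :=
  -- mid = (low + high) // 2, mid_pow4 = mid ** 4 inlined
  if _h : low ≤ high then
    if (PySem.Int.floordiv (low + high) 2) ^ 4 = x then PySem.Int.floordiv (low + high) 2
    else if (PySem.Int.floordiv (low + high) 2) ^ 4 < x then
      ifrLoop x (PySem.Int.floordiv (low + high) 2 + 1) high
    else ifrLoop x low (PySem.Int.floordiv (low + high) 2 - 1)
  else high
termination_by (high - low + 1).toNat
decreasing_by
  · have := PySem.Int.floordiv_two_mid_bounds (lo := low) (hi := high) _h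
    omega
  · have := PySem.Int.floordiv_two_mid_bounds (lo := low) (hi := high) _h
    omega

def integer_fourth_root (x : Int) : Int :=
  -- x < 0 raises ValueError in Python (excluded by Pre_); the port returns 0 there
  if x < 0 then 0
  else if x = 0 ∨ x = 1 then x
  else ifrLoop x 0 x

-- ===== PORT B =====
def integer_fourth_root_alt (x : Int) : Int :=
  -- x < 0 raises ValueError in Python (excluded by Pre_); the port returns 0 there
  if x < 0 then 0
  else
    -- reversed(range((x.bit_length() + 3) // 4)); 1 << k is 2 ^ k (k ≥ 0)
    ((List.range ((PySem.Int.bitLength x + 3) / 4)).reverse).foldl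
      (fun r k =>
        let c := r + 2 ^ k
        if c ^ 4 ≤ x then c else r) 0

-- ===== PRECONDITION & SPEC =====
-- Pre_ excludes exactly x < 0, where BOTH Pythons raise ValueError.
def Pre_integer_fourth_root (x : Int) : Prop := 0 ≤ x
instance (x : Int) : Decidable (Pre_integer_fourth_root x) := by unfold Pre_integer_fourth_root; infer_instance
def pvWitness_integer_fourth_root : Int := (17)

def Spec_integer_fourth_root (x : Int) (out : Int) : Prop := out = integer_fourth_root_alt x
instance (x : Int) (out : Int) : Decidable (Spec_integer_fourth_root x out) := by unfold Spec_integer_fourth_root; infer_instance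

-- ===== CLAIM (what is proved, stated in full; the proofs are below) =====
def Claim_equal_integer_fourth_root : Prop := ∀ (x : Int), Dom_integer_fourth_root x → Pre_integer_fourth_root x → Spec_integer_fourth_root x (integer_fourth_root x)

-- ===== LEMMAS AND PROOFS =====

-- characterisation: r is THE integer fourth root of x
def IsFR (x r : Int) : Prop := 0 ≤ r ∧ r ^ 4 ≤ x ∧ x < (r + 1) ^ 4

theorem isFR_unique {x r s : Int} (hr : IsFR x r) (hs : IsFR x s) : r = s := by
  obtain ⟨hr0, hr1, hr2⟩ := hr
  obtain ⟨hs0, hs1, hs2⟩ := hs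
  by_contra hne
  rcases lt_or_gt_of_ne hne with h | h
  · have : (r + 1) ^ 4 ≤ s ^ 4 := pow_le_pow_left₀ (by omega) (by omega) 4
    omega
  · have : (s + 1) ^ 4 ≤ r ^ 4 := pow_le_pow_left₀ (by omega) (by omega) 4
    omega

theorem ifrLoop_isFR (x : Int) (hx : 0 ≤ x) :
    ∀ low high : Int, 0 ≤ low → low ≤ high + 1 →
    (low - 1) ^ 4 ≤ x → x < (high + 1) ^ 4 → IsFR x (ifrLoop x low high) := by
  intro low high
  induction low, high using ifrLoop.induct x with
  | case1 low high hle heq =>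
    intro h0 _ hlo hhi
    have hb := PySem.Int.floordiv_two_mid_bounds (lo := low) (hi := high) hle
    rw [ifrLoop]
    simp only [dif_pos hle, if_pos heq]
    set mid := PySem.Int.floordiv (low + high) 2 with hm
    refine ⟨by omega, by omega, ?_⟩
    have : mid ^ 4 < (mid + 1) ^ 4 := by nlinarith [sq_nonneg mid, sq_nonneg (mid + 1)]
    omega
  | case2 low high hle hne hlt ih =>
    intro h0 _ hlo hhi
    have hb := PySem.Int.floordiv_two_mid_bounds (lo := low) (hi := high) hle
    rw [ifrLoop]
    simp only [dif_pos hle, if_neg hne, if_pos hlt]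
    refine ih (by omega) (by omega) ?_ hhi
    have : PySem.Int.floordiv (low + high) 2 + 1 - 1 = PySem.Int.floordiv (low + high) 2 := by
      ring
    rw [this]; omega
  | case3 low high hle hne hge ih =>
    intro h0 _ hlo hhi
    have hb := PySem.Int.floordiv_two_mid_bounds (lo := low) (hi := high) hle
    rw [ifrLoop]
    simp only [dif_pos hle, if_neg hne, if_neg hge]
    refine ih (by omega) (by omega) hlo ?_
    have : PySem.Int.floordiv (low + high) 2 - 1 + 1 = PySem.Int.floordiv (low + high) 2 := by
      ring
    rw [this]; omega
  | case4 low high hle =>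
    intro h0 hle1 hlo hhi
    rw [ifrLoop]
    simp only [dif_neg hle]
    have hlh : low = high + 1 := by omega
    subst hlh
    have hlo' : high ^ 4 ≤ x := by
      have : high + 1 - 1 = high := by ring
      rw [this] at hlo; exact hlo
    refine ⟨?_, hlo', hhi⟩
    by_contra hneg
    have h1 : high + 1 ≤ 0 := by omega
    have : (high + 1) ^ 4 ≤ high ^ 4 := by
      nlinarith [sq_nonneg high, sq_nonneg (high + 1)]
    omega

theorem a_isFR (x : Int) (hx : 0 ≤ x) : IsFR x (integer_fourth_root x) := by
  unfold integer_fourth_root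
  rw [if_neg (by omega)]
  by_cases h01 : x = 0 ∨ x = 1
  · rw [if_pos h01]
    rcases h01 with h | h <;> subst h <;> exact ⟨by norm_num, by norm_num, by norm_num⟩
  · rw [if_neg h01]
    have hx2 : 2 ≤ x := by omega
    refine ifrLoop_isFR x hx 0 x (le_refl 0) (by omega) (by norm_num; omega) ?_
    nlinarith [sq_nonneg x, sq_nonneg (x + 1)]

-- greedy bit-setting invariant for B's fold
theorem foldB_isFR (x : Int) (hx : 0 ≤ x) :
    ∀ (K : Nat) (r : Int), 0 ≤ r → r ^ 4 ≤ x → x < (r + 2 ^ K) ^ 4 →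
    IsFR x (((List.range K).reverse).foldl
      (fun r k => let c := r + 2 ^ k; if c ^ 4 ≤ x then c else r) r) := by
  intro K
  induction K with
  | zero =>
    intro r h0 h1 h2
    simpa using ⟨h0, h1, by simpa using h2⟩
  | succ K ih =>
    intro r h0 h1 h2
    rw [List.range_succ, List.reverse_append]
    simp only [List.reverse_singleton, List.singleton_append, List.foldl_cons]
    by_cases hc : (r + 2 ^ K) ^ 4 ≤ x
    · simp only [if_pos hc]
      refine ih (r + 2 ^ K) (by positivity) hc ?_
      have : r + 2 ^ K + 2 ^ K = r + 2 ^ (K + 1) := by ring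
      rw [this]; exact h2
    · simp only [if_neg hc]
      exact ih r h0 h1 (by omega)

theorem b_isFR (x : Int) (hx : 0 ≤ x) : IsFR x (integer_fourth_root_alt x) := by
  unfold integer_fourth_root_alt
  rw [if_neg (by omega)]
  set K := (PySem.Int.bitLength x + 3) / 4 with hK
  refine foldB_isFR x hx K 0 (le_refl 0) (by simpa using hx) ?_
  have hbl : x.natAbs < 2 ^ PySem.Int.bitLength x := PySem.Int.lt_two_pow_bitLength x
  have h4K : PySem.Int.bitLength x ≤ 4 * K := by omega
  have hmono : (2 : Nat) ^ PySem.Int.bitLength x ≤ 2 ^ (4 * K) :=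
    Nat.pow_le_pow_right (by norm_num) h4K
  have hxlt : x < ((2 : Int)) ^ (4 * K) := by
    have : (x.natAbs : Int) = x := Int.natAbs_of_nonneg hx
    calc x = (x.natAbs : Int) := this.symm
    _ < ((2 ^ PySem.Int.bitLength x : Nat) : Int) := by exact_mod_cast hbl
    _ ≤ ((2 ^ (4 * K) : Nat) : Int) := by exact_mod_cast hmono
    _ = (2 : Int) ^ (4 * K) := by push_cast; ring
  have : ((0 : Int) + 2 ^ K) ^ 4 = 2 ^ (4 * K) := by
    rw [zero_add, ← pow_mul, Nat.mul_comm]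
  rw [this]; exact hxlt

-- ===== VERDICT (by name: the statement is the Claim_ definition above) =====
theorem integer_fourth_root_spec : Claim_equal_integer_fourth_root := by
  intro x _ hpre
  exact isFR_unique (a_isFR x hpre) (b_isFR x hpre)
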